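-- pv_equiv track=rewrite | github.com/jednipit-golf/Comprog | HW/HW2.py | get_repeat_count
-- ===== SOURCE A (Python) =====
-- def get_repeat_count(data, pattern):
--     for i in range(len(data) - 1):
--         if data[i:i + 2] == pattern:
--             count = 1
--             j = i + 2
--             while j < len(data) - 1:
--                 if data[j:j + 2] == pattern:
--                     count += 1
--                     j += 2
--                 else:
--                     break
--             if count >= 2:
--                 return count
--             else:
--                 count = 0
--     return 0
-- ===== SOURCE B (Python) =====
-- def get_repeat_count(data, pattern):
--     # Backward dynamic-programming pass: run-length of consecutive pattern
--     # occurrences (stride 2) at each index, kept in two rolling cells;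
--     # the leftmost run of length >= 2 survives as the answer.
--     n = len(data)
--     ans = 0
--     r1 = 0  # run length starting at i + 1
--     r2 = 0  # run length starting at i + 2
--     for i in range(n - 2, -1, -1):
--         r0 = r2 + 1 if data[i:i + 2] == pattern else 0
--         if r0 >= 2:
--             ans = r0
--         r1, r2 = r0, r1
--     return ans
-- ===== Notes on version B (the rewrite author's own statement) =====
-- stated objective: alternative
-- what changed: A's forward scan with a nested counting loop (count consecutive matches at each candidate, return if >= 2) is replaced by a single backward dynamic-programming pass that keeps the stride-2 run lengths in two rolling cells and records the leftmost run of length >= 2.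
import Mathlib
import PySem

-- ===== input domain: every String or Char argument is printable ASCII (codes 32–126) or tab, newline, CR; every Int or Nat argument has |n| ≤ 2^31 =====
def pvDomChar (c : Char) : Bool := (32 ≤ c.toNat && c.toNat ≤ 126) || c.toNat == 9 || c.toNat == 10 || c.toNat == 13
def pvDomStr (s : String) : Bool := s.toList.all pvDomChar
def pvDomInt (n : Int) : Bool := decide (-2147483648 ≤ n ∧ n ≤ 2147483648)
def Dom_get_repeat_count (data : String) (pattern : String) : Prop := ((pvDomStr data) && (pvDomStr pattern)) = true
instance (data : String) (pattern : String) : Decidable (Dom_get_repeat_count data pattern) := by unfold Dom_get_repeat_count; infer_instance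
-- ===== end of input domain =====

-- B replaces A's forward scan with a nested counting loop by a single backward pass that
-- maintains stride-2 run lengths in two rolling cells and keeps the leftmost run ≥ 2
-- (objective: alternative; same O(n) cost).

-- ===== PORT A =====
-- A's inner while loop: count of further consecutive pattern slices from j.
def pvInnerA (cs pat : List Char) (j : Nat) : Int :=
  if h : j < cs.length - 1 then
    if PySem.List.slice cs (some (j : Int)) (some ((j : Int) + 2)) == pat then
      1 + pvInnerA cs pat (j + 2)
    else 0
  else 0
termination_by cs.length - 1 - j
decreasing_by omega

-- A's outer for loop over range(len(data)-1) with the early return.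
def pvOuterA (cs pat : List Char) (i : Nat) : Int :=
  if h : i < cs.length - 1 then
    if PySem.List.slice cs (some (i : Int)) (some ((i : Int) + 2)) == pat then
      let c : Int := 1 + pvInnerA cs pat (i + 2)
      if 2 ≤ c then c else pvOuterA cs pat (i + 1)
    else pvOuterA cs pat (i + 1)
  else 0
termination_by cs.length - 1 - i
decreasing_by all_goals omega

def get_repeat_count (data : String) (pattern : String) : Int :=
  pvOuterA data.toList pattern.toList 0

-- ===== PORT B =====
-- Source B's backward for loop over range(n-2, -1, -1): pvStateB cs pat i is the state
-- (ans, r1, r2) after the loop has processed indices n-2 down to i (the loop runs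
-- body for i exactly when i + 2 ≤ n, i.e. i ∈ range(n-2,-1,-1)).
def pvStateB (cs pat : List Char) (i : Nat) : Int × Int × Int :=
  if h : i + 2 ≤ cs.length then
    let s := pvStateB cs pat (i + 1)
    let r0 : Int :=
      if PySem.List.slice cs (some (i : Int)) (some ((i : Int) + 2)) == pat then s.2.2 + 1 else 0
    (if 2 ≤ r0 then r0 else s.1, r0, s.2.1)
  else (0, 0, 0)
termination_by cs.length - i
decreasing_by omega

def get_repeat_count_alt (data : String) (pattern : String) : Int :=
  (pvStateB data.toList pattern.toList 0).1

-- ===== PRECONDITION & SPEC =====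
def Spec_get_repeat_count (data : String) (pattern : String) (out : Int) : Prop := out = get_repeat_count_alt data pattern
instance (data : String) (pattern : String) (out : Int) : Decidable (Spec_get_repeat_count data pattern out) := by unfold Spec_get_repeat_count; infer_instance

-- ===== CLAIM (what is proved, stated in full; the proofs are below) =====
def Claim_equal_get_repeat_count : Prop := ∀ (data : String) (pattern : String), Dom_get_repeat_count data pattern → Spec_get_repeat_count data pattern (get_repeat_count data pattern)

-- ===== LEMMAS AND PROOFS =====

-- The two rolling cells of B's state hold the run lengths at i and i+1,
-- which are exactly A's inner counts.
theorem pvStateB_runs (cs pat : List Char) (i : Nat) :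
    (pvStateB cs pat i).2.1 = pvInnerA cs pat i ∧
    (pvStateB cs pat i).2.2 = pvInnerA cs pat (i + 1) := by
  rw [pvStateB]
  by_cases h : i + 2 ≤ cs.length
  · rw [dif_pos h]
    have ih := pvStateB_runs cs pat (i + 1)
    constructor
    · show (if PySem.List.slice cs (some (i : Int)) (some ((i : Int) + 2)) == pat
          then (pvStateB cs pat (i + 1)).2.2 + 1 else 0) = pvInnerA cs pat i
      rw [pvInnerA, dif_pos (by omega : i < cs.length - 1), ih.2]
      split
      · ring
      · rfl
    · show (pvStateB cs pat (i + 1)).2.1 = pvInnerA cs pat (i + 1)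
      exact ih.1
  · rw [dif_neg h]
    constructor
    · rw [pvInnerA, dif_neg (by omega : ¬ i < cs.length - 1)]
    · rw [pvInnerA, dif_neg (by omega : ¬ i + 1 < cs.length - 1)]
termination_by cs.length - i
decreasing_by all_goals omega

theorem pvMain (cs pat : List Char) (i : Nat) :
    pvOuterA cs pat i = (pvStateB cs pat i).1 := by
  rw [pvOuterA, pvStateB]
  by_cases h : i < cs.length - 1
  · rw [dif_pos h, dif_pos (by omega : i + 2 ≤ cs.length)]
    have hruns := pvStateB_runs cs pat (i + 1)
    show _ = (if 2 ≤ (if PySem.List.slice cs (some (i : Int)) (some ((i : Int) + 2)) == pat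
        then (pvStateB cs pat (i + 1)).2.2 + 1 else 0)
      then (if PySem.List.slice cs (some (i : Int)) (some ((i : Int) + 2)) == pat
        then (pvStateB cs pat (i + 1)).2.2 + 1 else 0)
      else (pvStateB cs pat (i + 1)).1)
    rw [hruns.2]
    have h2 : ((i + 1 : Nat)) + 1 = i + 2 := by omega
    rw [h2]
    by_cases hm : PySem.List.slice cs (some (i : Int)) (some ((i : Int) + 2)) == pat
    · rw [if_pos hm, if_pos hm]
      by_cases hc : 2 ≤ 1 + pvInnerA cs pat (i + 2)
      · rw [if_pos hc, if_pos (by omega : 2 ≤ pvInnerA cs pat (i + 2) + 1)]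
        ring
      · rw [if_neg hc, if_neg (by omega : ¬ 2 ≤ pvInnerA cs pat (i + 2) + 1)]
        exact pvMain cs pat (i + 1)
    · rw [if_neg hm, if_neg hm, if_neg (by omega : ¬ (2:Int) ≤ 0)]
      exact pvMain cs pat (i + 1)
  · rw [dif_neg h, dif_neg (by omega : ¬ i + 2 ≤ cs.length)]
termination_by cs.length - 1 - i
decreasing_by all_goals omega

-- ===== VERDICT (by name: the statement is the Claim_ definition above) =====
theorem get_repeat_count_spec : Claim_equal_get_repeat_count := by
  intro data pattern _
  show get_repeat_count data pattern = get_repeat_count_alt data pattern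
  unfold get_repeat_count get_repeat_count_alt
  exact pvMain data.toList pattern.toList 0
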